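-- pv_equiv track=rewrite | github.com/NaoakiUmedu/algorithm_library | SuretuNosa.py | solve
-- ===== SOURCE A (Python) =====
-- def solve(N, X):
--
--     total = 0
--     sum_x = sum_x2 = 0
--     for i in range(N):
--         total += i * X[i] ** 2 - 2 * X[i] * sum_x + sum_x2
--
--         sum_x += X[i]
--         sum_x2 += X[i] ** 2
--     return int(total)
-- ===== SOURCE B (Python) =====
-- def solve(N, X):
--     total = 0
--     for i in range(N):
--         for j in range(i):
--             total += (X[i] - X[j]) ** 2
--     return int(total)
-- ===== Notes on version B (the rewrite author's own statement) =====
-- stated objective: simpler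
-- what changed: Replaces A's single-pass running-sum (prefix sum and prefix sum of squares) accumulation with a direct nested all-pairs scan adding (X[i]-X[j])**2 for each pair j<i.
import Mathlib
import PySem

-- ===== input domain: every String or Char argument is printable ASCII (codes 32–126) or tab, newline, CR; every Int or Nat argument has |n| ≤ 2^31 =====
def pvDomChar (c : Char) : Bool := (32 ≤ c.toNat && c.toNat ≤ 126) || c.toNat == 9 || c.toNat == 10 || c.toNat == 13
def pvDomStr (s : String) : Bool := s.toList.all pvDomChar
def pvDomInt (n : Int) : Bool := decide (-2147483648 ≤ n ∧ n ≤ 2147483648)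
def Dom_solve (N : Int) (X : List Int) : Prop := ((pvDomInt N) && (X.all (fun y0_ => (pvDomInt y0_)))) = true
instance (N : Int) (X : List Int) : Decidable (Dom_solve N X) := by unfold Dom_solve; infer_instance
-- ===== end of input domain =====

-- B replaces A's single-pass running-sum accumulation by a plain nested all-pairs scan (simpler, not faster).

-- ===== PORT A =====
-- state (total, sum_x, sum_x2); X[i] ported as pyGetD (in range under Pre_solve)
def solve (N : Int) (X : List Int) : Int :=
  (PySem.List.pyRange 0 N 1).foldl
    (fun (st : Int × Int × Int) i =>
      let xi := PySem.List.pyGetD X i 0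
      (st.1 + i * xi ^ 2 - 2 * xi * st.2.1 + st.2.2, st.2.1 + xi, st.2.2 + xi ^ 2))
    (0, 0, 0) |>.1

-- ===== PORT B =====
def solve_alt (N : Int) (X : List Int) : Int :=
  (PySem.List.pyRange 0 N 1).foldl
    (fun total i =>
      (PySem.List.pyRange 0 i 1).foldl
        (fun t j => t + (PySem.List.pyGetD X i 0 - PySem.List.pyGetD X j 0) ^ 2) total)
    0

-- ===== PRECONDITION & SPEC =====
-- A raises IndexError when N exceeds len(X); only those inputs are excluded.
def Pre_solve (N : Int) (X : List Int) : Prop := N ≤ (X.length : Int)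
instance (N : Int) (X : List Int) : Decidable (Pre_solve N X) := by unfold Pre_solve; infer_instance
def pvWitness_solve : Int × List Int := (3, [1, -2, 4])

def Spec_solve (N : Int) (X : List Int) (out : Int) : Prop := out = solve_alt N X
instance (N : Int) (X : List Int) (out : Int) : Decidable (Spec_solve N X out) := by unfold Spec_solve; infer_instance

-- ===== CLAIM (what is proved, stated in full; the proofs are below) =====
def Claim_equal_solve : Prop := ∀ (N : Int) (X : List Int), Dom_solve N X → Pre_solve N X → Spec_solve N X (solve N X)

-- ===== LEMMAS AND PROOFS =====

-- prefix sum and prefix sum of squares of X.getD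
def pvS (X : List Int) : Nat → Int
  | 0 => 0
  | n + 1 => pvS X n + X.getD n 0

def pvS2 (X : List Int) : Nat → Int
  | 0 => 0
  | n + 1 => pvS2 X n + (X.getD n 0) ^ 2

-- inner loop of B in closed form via prefix sums
lemma pvInner (X : List Int) (xi : Int) (i : Nat) (acc : Int) :
    (List.range i).foldl (fun t j => t + (xi - X.getD j 0) ^ 2) acc
      = acc + (i : Int) * xi ^ 2 - 2 * xi * pvS X i + pvS2 X i := by
  induction i generalizing acc with
  | zero => simp [pvS, pvS2]
  | succ n ih =>
      rw [List.range_succ, List.foldl_append]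
      simp only [List.foldl_cons, List.foldl_nil, ih]
      simp [pvS, pvS2]
      ring

-- the whole A-fold state over List.range n equals (B's total, prefix sums)
lemma pvMain (X : List Int) (n : Nat) :
    (List.range n).foldl
      (fun (st : Int × Int × Int) k =>
        let xi := X.getD k 0
        (st.1 + (k : Int) * xi ^ 2 - 2 * xi * st.2.1 + st.2.2, st.2.1 + xi, st.2.2 + xi ^ 2))
      (0, 0, 0)
    = ((List.range n).foldl
        (fun total i => (List.range i).foldl
          (fun t j => t + (X.getD i 0 - X.getD j 0) ^ 2) total) 0,
       pvS X n, pvS2 X n) := by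
  induction n with
  | zero => simp [pvS, pvS2]
  | succ m ih =>
      rw [List.range_succ, List.foldl_append, List.foldl_append, ih]
      simp only [List.foldl_cons, List.foldl_nil]
      rw [pvInner]
      simp [pvS, pvS2]

-- pyRange 0 N 1 as a Nat range with pyGetD reduced to getD
lemma pvRangeFold {α : Type} (N : Int) (f : α → Nat → α) (g : α → Int → α) (init : α)
    (hfg : ∀ a (k : Nat), g a (0 + (k : Int)) = f a k) :
    (PySem.List.pyRange 0 N 1).foldl g init = (List.range N.toNat).foldl f init := by
  rw [PySem.List.pyRange_one, List.foldl_map]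
  simp only [Int.sub_zero, hfg]

-- ===== VERDICT (by name: the statement is the Claim_ definition above) =====
theorem solve_spec : Claim_equal_solve := by
  intro N X _ _
  show solve N X = solve_alt N X
  unfold solve solve_alt
  rw [pvRangeFold N
      (fun (st : Int × Int × Int) k =>
        let xi := X.getD k 0
        (st.1 + (k : Int) * xi ^ 2 - 2 * xi * st.2.1 + st.2.2, st.2.1 + xi, st.2.2 + xi ^ 2))
      _ _ (by intro a k; simp),
    pvRangeFold N
      (fun total i => (List.range i).foldl
        (fun t j => t + (X.getD i 0 - X.getD j 0) ^ 2) total)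
      _ _ (by
        intro a k
        rw [pvRangeFold ((0:Int) + (k:Int))
          (fun t (j : Nat) => t + (X.getD k 0 - X.getD j 0) ^ 2) _ a (by intro t j; simp)]
        simp),
    pvMain]
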